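-- pv_equiv track=rewrite | github.com/cmoron/aoc_2023 | 6/6.py | find_start_offset
-- ===== SOURCE A (Python) =====
-- def compute_distance(time, max_time):
--     if time in (0, max_time):
--         return 0
--     speed = time
--     return speed * (max_time - time)
--
-- def find_start_offset(offset_min, offset_max, max_time, distance):
--     offset = (offset_min + offset_max) // 2
--     score = compute_distance(offset, max_time)
--     if offset_max - offset_min <= 2:
--         if score <= distance:
--             return offset + 1
--         return offset
--
--     if score >= distance:
--         return find_start_offset(offset_min, offset, max_time, distance)
--     return find_start_offset(offset, offset_max, max_time, distance)
-- ===== SOURCE B (Python) =====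
-- def compute_distance(time, max_time):
--     if time in (0, max_time):
--         return 0
--     speed = time
--     return speed * (max_time - time)
--
-- def find_start_offset(offset_min, offset_max, max_time, distance):
--     while offset_max - offset_min > 2:
--         offset = (offset_min + offset_max) // 2
--         if compute_distance(offset, max_time) >= distance:
--             offset_max = offset
--         else:
--             offset_min = offset
--     offset = (offset_min + offset_max) // 2
--     if compute_distance(offset, max_time) <= distance:
--         return offset + 1
--     return offset
-- ===== Notes on version B (the rewrite author's own statement) =====
-- stated objective: idiomatic
-- what changed: The tail recursion is rewritten as an iterative while-loop that only narrows the (offset_min, offset_max) window, with the base-case test hoisted out of the loop.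
import Mathlib
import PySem

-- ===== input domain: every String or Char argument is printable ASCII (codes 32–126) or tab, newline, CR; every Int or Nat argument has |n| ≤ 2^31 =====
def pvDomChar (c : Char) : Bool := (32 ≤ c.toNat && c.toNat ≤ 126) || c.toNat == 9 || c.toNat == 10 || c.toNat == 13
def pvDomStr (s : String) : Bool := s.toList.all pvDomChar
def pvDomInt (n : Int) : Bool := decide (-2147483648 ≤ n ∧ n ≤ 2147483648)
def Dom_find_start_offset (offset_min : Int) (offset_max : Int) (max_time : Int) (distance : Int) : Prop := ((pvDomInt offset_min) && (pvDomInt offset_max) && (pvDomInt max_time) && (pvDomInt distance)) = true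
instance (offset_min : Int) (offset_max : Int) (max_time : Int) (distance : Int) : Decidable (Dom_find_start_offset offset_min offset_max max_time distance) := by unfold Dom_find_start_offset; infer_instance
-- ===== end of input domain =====

-- B rewrites A's tail recursion as an iterative window-narrowing loop (same cost; objective: idiomatic).

-- ===== PORT A =====
def compute_distance (time : Int) (max_time : Int) : Int :=
  if time = 0 ∨ time = max_time then 0
  else time * (max_time - time)

def find_start_offset (offset_min : Int) (offset_max : Int) (max_time : Int) (distance : Int) : Int :=
  let offset := PySem.Int.floordiv (offset_min + offset_max) 2
  let score := compute_distance offset max_time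
  if offset_max - offset_min ≤ 2 then
    if score ≤ distance then offset + 1 else offset
  else if score ≥ distance then
    find_start_offset offset_min offset max_time distance
  else
    find_start_offset offset offset_max max_time distance
termination_by (offset_max - offset_min).toNat
decreasing_by
  all_goals
    simp only [PySem.Int.floordiv_eq_ediv_of_pos (by norm_num : (0:Int) < 2)] at *
    omega

-- ===== PORT B =====
-- the while-loop: narrows (offset_min, offset_max) until the window is ≤ 2
def fso_loop (offset_min : Int) (offset_max : Int) (max_time : Int) (distance : Int) : Int × Int :=
  if offset_max - offset_min > 2 then
    let offset := PySem.Int.floordiv (offset_min + offset_max) 2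
    if compute_distance offset max_time ≥ distance then
      fso_loop offset_min offset max_time distance
    else
      fso_loop offset offset_max max_time distance
  else (offset_min, offset_max)
termination_by (offset_max - offset_min).toNat
decreasing_by
  all_goals
    simp only [PySem.Int.floordiv_eq_ediv_of_pos (by norm_num : (0:Int) < 2)] at *
    omega

def find_start_offset_alt (offset_min : Int) (offset_max : Int) (max_time : Int) (distance : Int) : Int :=
  let p := fso_loop offset_min offset_max max_time distance
  let offset := PySem.Int.floordiv (p.1 + p.2) 2
  if compute_distance offset max_time ≤ distance then offset + 1 else offset

-- ===== PRECONDITION & SPEC =====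
def Spec_find_start_offset (offset_min : Int) (offset_max : Int) (max_time : Int) (distance : Int) (out : Int) : Prop := out = find_start_offset_alt offset_min offset_max max_time distance
instance (offset_min : Int) (offset_max : Int) (max_time : Int) (distance : Int) (out : Int) : Decidable (Spec_find_start_offset offset_min offset_max max_time distance out) := by unfold Spec_find_start_offset; infer_instance

-- ===== CLAIM (what is proved, stated in full; the proofs are below) =====
def Claim_equal_find_start_offset : Prop := ∀ (offset_min : Int) (offset_max : Int) (max_time : Int) (distance : Int), Dom_find_start_offset offset_min offset_max max_time distance → Spec_find_start_offset offset_min offset_max max_time distance (find_start_offset offset_min offset_max max_time distance)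

-- ===== LEMMAS AND PROOFS =====

theorem fso_eq_alt (offset_min offset_max max_time distance : Int) :
    find_start_offset offset_min offset_max max_time distance =
      find_start_offset_alt offset_min offset_max max_time distance := by
  fun_induction find_start_offset offset_min offset_max max_time distance with
  | case1 mn mx offset score hle hsc =>
      simp only [offset, score] at hsc
      rw [PySem.Int.floordiv_eq_ediv_of_pos (by norm_num : (0:Int) < 2)] at hsc
      simp only [find_start_offset_alt]
      rw [fso_loop, if_neg (by omega : ¬ mx - mn > 2)]
      simp [hsc, offset]
  | case2 mn mx offset score hle hsc =>
      simp only [offset, score] at hsc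
      rw [PySem.Int.floordiv_eq_ediv_of_pos (by norm_num : (0:Int) < 2)] at hsc
      simp only [find_start_offset_alt]
      rw [fso_loop, if_neg (by omega : ¬ mx - mn > 2)]
      simp [hsc, offset]
  | case3 mn mx offset score hgt hsc ih =>
      simp only [offset, score] at hsc ih
      rw [PySem.Int.floordiv_eq_ediv_of_pos (by norm_num : (0:Int) < 2)] at hsc
      rw [ih]
      have hstep : fso_loop mn mx max_time distance =
          fso_loop mn (PySem.Int.floordiv (mn + mx) 2) max_time distance := by
        rw [fso_loop, if_pos (by omega : mx - mn > 2)]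
        simp [hsc]
      simp only [find_start_offset_alt]
      rw [hstep]
  | case4 mn mx offset score hgt hsc ih =>
      simp only [offset, score] at hsc ih
      rw [PySem.Int.floordiv_eq_ediv_of_pos (by norm_num : (0:Int) < 2)] at hsc
      rw [ih]
      have hstep : fso_loop mn mx max_time distance =
          fso_loop (PySem.Int.floordiv (mn + mx) 2) mx max_time distance := by
        rw [fso_loop, if_pos (by omega : mx - mn > 2)]
        simp [hsc]
      simp only [find_start_offset_alt]
      rw [hstep]

-- ===== VERDICT (by name: the statement is the Claim_ definition above) =====
theorem find_start_offset_spec : Claim_equal_find_start_offset := by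
  intro mn mx mt d _
  exact fso_eq_alt mn mx mt d
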